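-- pv_equiv track=rewrite | github.com/trianaq765-cmd/Test-obf | lua_vm_generator.py | _minify
-- ===== SOURCE A (Python) =====
-- def _minify(code: str) -> str:
--     """Basic minification"""
--     lines = []
--     for line in code.split('\n'):
--         # Remove comments
--         if '--' in line:
--             line = line[:line.index('--')]
--         # Strip whitespace
--         line = line.strip()
--         if line:
--             lines.append(line)
--
--     # Join with minimal separators
--     result = ' '
--     for line in lines:
--         if result[-1] in 'abcdefghijklmnopqrstuvwxyzABCDEFGHIJKLMNOPQRSTUVWXYZ0123456789_':
--             if line[0] in 'abcdefghijklmnopqrstuvwxyzABCDEFGHIJKLMNOPQRSTUVWXYZ0123456789_':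
--                 result += ' '
--         result += line
--
--     return result.strip()
-- ===== SOURCE B (Python) =====
-- def _minify(code: str) -> str:
--     """Basic minification: single character-level scan with a comment/line-boundary
--     state machine (no line splitting)."""
--     out = []            # emitted characters
--     hold = []           # whitespace run inside the current line, not yet known to be internal
--     in_comment = False  # between '--' and the next newline
--     broke = False       # at least one line break since the last emitted character
--     i = 0
--     n = len(code)
--     while i < n:
--         c = code[i]
--         if c == '\n':
--             in_comment = False
--             hold = []
--             broke = True
--             i += 1
--         elif in_comment:
--             i += 1
--         elif c == '-' and i + 1 < n and code[i + 1] == '-':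
--             in_comment = True
--             i += 2
--         elif c.isspace():
--             if out and not broke:
--                 hold.append(c)
--             i += 1
--         else:
--             if broke:
--                 if out and out[-1] in _ID and c in _ID:
--                     out.append(' ')
--                 broke = False
--             else:
--                 out.extend(hold)
--             hold = []
--             out.append(c)
--             i += 1
--     return ''.join(out)
--
--
-- _ID = set('abcdefghijklmnopqrstuvwxyzABCDEFGHIJKLMNOPQRSTUVWXYZ0123456789_')
-- ===== Notes on version B (the rewrite author's own statement) =====
-- stated objective: alternative
-- what changed: Replaces A's two-stage line pipeline (split into lines, per-line comment-truncate/strip/filter, then a join loop inspecting result[-1]) by a single character-level scan that never builds lines: a small state machine (in-comment flag, pending-whitespace buffer, line-break flag) emits each character once and inserts a space at a line break only between identifier characters.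
import Mathlib
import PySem

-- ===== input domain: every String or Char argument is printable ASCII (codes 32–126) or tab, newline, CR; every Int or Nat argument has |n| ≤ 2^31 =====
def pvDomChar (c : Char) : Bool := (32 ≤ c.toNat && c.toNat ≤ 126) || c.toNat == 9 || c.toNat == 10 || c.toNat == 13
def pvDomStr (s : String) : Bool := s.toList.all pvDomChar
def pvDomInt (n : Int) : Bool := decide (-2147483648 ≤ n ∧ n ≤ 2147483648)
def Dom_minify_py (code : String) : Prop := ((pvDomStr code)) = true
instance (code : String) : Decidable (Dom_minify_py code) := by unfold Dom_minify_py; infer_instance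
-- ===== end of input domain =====

-- B replaces A's line pipeline (split, per-line clean, join loop reading result[-1]) by one
-- character-level scan with a comment/line-boundary state machine; objective: alternative.

-- ===== PORT A =====
-- the identifier alphabet A spells out as a string literal
def pvIdent : List Char :=
  "abcdefghijklmnopqrstuvwxyzABCDEFGHIJKLMNOPQRSTUVWXYZ0123456789_".toList

-- comment stripping + strip of one line ('--' in line / line.index('--') / line[:i] / strip)
def pvCleanA (line : List Char) : List Char :=
  let line := if PySem.Chars.isIn ['-', '-'] line then
      PySem.Chars.slice line none (some (PySem.Chars.find line ['-', '-']))
    else line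
  PySem.Chars.strip line

-- one step of A's join loop; result[-1] / line[0] are pyGet? (always `some` here: result starts
-- at ' ' and lines are nonempty), and `c in '<alphabet>'` on a single char is exactly membership
def pvStepA (result line : List Char) : List Char :=
  let result :=
    if (PySem.List.pyGet? result (-1)).any pvIdent.contains then
      if (PySem.List.pyGet? line 0).any pvIdent.contains then result ++ [' ']
      else result
    else result
  result ++ line

def minify_py (code : String) : String :=
  let lines := (PySem.Chars.splitOn code.toList ['\n']).foldl
    (fun lines line =>
      let line := pvCleanA line
      if line ≠ [] then lines ++ [line] else lines) []
  let result := lines.foldl pvStepA [' ']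
  String.ofList (PySem.Chars.strip result)

-- ===== PORT B =====
-- B's _ID set literal
def pvIdentSet : PySem.Set Char := PySem.Set.ofList pvIdent

-- B's while loop over the characters: out / hold / in_comment / broke are the loop state;
-- the `code[i+1] == '-'` lookahead is `rest.head? = some '-'` and `i += 2` is `rest.tail`.
def pvScan (out hold : List Char) (inComment broke : Bool) : List Char → List Char
  | [] => out
  | c :: rest =>
    if c = '\n' then
      pvScan out [] false true rest
    else if inComment then
      pvScan out hold inComment broke rest
    else if c = '-' ∧ rest.head? = some '-' then
      pvScan out hold true broke rest.tail
    else if PySem.Chars.isspace c then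
      pvScan out (if out ≠ [] ∧ broke = false then hold ++ [c] else hold) inComment broke rest
    else
      pvScan
        ((if broke then
            (if out ≠ [] ∧ (PySem.List.pyGet? out (-1)).any pvIdentSet.contains = true ∧
                pvIdentSet.contains c = true then out ++ [' '] else out)
          else out ++ hold) ++ [c]) [] inComment false rest
termination_by l => l.length
decreasing_by all_goals simp [List.length_tail]

def minify_py_alt (code : String) : String :=
  String.ofList (pvScan [] [] false false code.toList)

-- ===== PRECONDITION & SPEC =====
def Spec_minify_py (code : String) (out : String) : Prop := out = minify_py_alt code
instance (code : String) (out : String) : Decidable (Spec_minify_py code out) := by unfold Spec_minify_py; infer_instance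

-- ===== CLAIM (what is proved, stated in full; the proofs are below) =====
def Claim_equal_minify_py : Prop := ∀ (code : String), Dom_minify_py code → Spec_minify_py code (minify_py code)

-- ===== LEMMAS AND PROOFS =====

-- truncate a line at the first '--' (structural view of line[:line.index('--')])
def pvTrunc : List Char → List Char
  | [] => []
  | c :: rest => if c = '-' ∧ rest.head? = some '-' then [] else c :: pvTrunc rest

-- the cleaned form of one line
def pvClean (l : List Char) : List Char := PySem.Chars.strip (pvTrunc l)

-- does this line end (resp. start) with an identifier character?
def pvIdLast (l : List Char) : Bool := (PySem.List.pyGet? l (-1)).any pvIdent.contains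
def pvIdFirst (l : List Char) : Bool := (PySem.List.pyGet? l 0).any pvIdent.contains

-- the common value of both programs: cleaned lines glued with the identifier-boundary rule
def pvGlue : List Char → List (List Char) → List Char
  | _, [] => []
  | prev, c :: cs => (if pvIdLast prev && pvIdFirst c then [' '] else []) ++ c ++ pvGlue c cs

def pvGlueAll : List (List Char) → List Char
  | [] => []
  | l0 :: rest => l0 ++ pvGlue l0 rest

-- structural view of splitOn on '\n'
def pvSplit (cur : List Char) : List Char → List (List Char)
  | [] => [cur]
  | c :: rest => if c = '\n' then cur :: pvSplit [] rest else pvSplit (cur ++ [c]) rest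

-- what the scan emits after the first content character of a line
def pvBody (hold : List Char) : List Char → List Char
  | [] => []
  | c :: rest =>
    if c = '-' ∧ rest.head? = some '-' then []
    else if PySem.Chars.isspace c then pvBody (hold ++ [c]) rest
    else hold ++ c :: pvBody [] rest

set_option maxRecDepth 4096 in
theorem pvIdentSet_eq : pvIdentSet = pvIdent := by decide

theorem pvIdLast_nil : pvIdLast [] = false := by decide

theorem pvIdFirst_cons (c : Char) (m : List Char) :
    pvIdFirst (c :: m) = pvIdent.contains c := by
  simp [pvIdFirst, PySem.List.pyGet?, PySem.List.pyIdx?]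

theorem pvStepA_eq (acc l : List Char) :
    pvStepA acc l = acc ++ ((if pvIdLast acc && pvIdFirst l then [' '] else []) ++ l) := by
  simp only [pvStepA, pvIdLast, pvIdFirst]
  by_cases h1 : (PySem.List.pyGet? acc (-1)).any pvIdent.contains <;>
    by_cases h2 : (PySem.List.pyGet? l 0).any pvIdent.contains <;>
    simp [h1, h2]

theorem pvGlue_congr {a b : List Char} (h : pvIdLast a = pvIdLast b) (ls : List (List Char)) :
    pvGlue a ls = pvGlue b ls := by
  cases ls with
  | nil => rfl
  | cons c cs => simp [pvGlue, h]

theorem pvIdLast_append (a c : List Char) (hc : c ≠ []) : pvIdLast (a ++ c) = pvIdLast c := by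
  simp [pvIdLast, PySem.List.pyGet?_neg_one, List.getLast?_append_of_ne_nil _ hc]

-- A's join loop computes acc ++ glue
theorem pvFoldA_eq (ls : List (List Char)) :
    ∀ acc : List Char, (∀ l ∈ ls, l ≠ []) → ls.foldl pvStepA acc = acc ++ pvGlue acc ls := by
  induction ls with
  | nil => intro acc _; simp [pvGlue]
  | cons c cs ih =>
    intro acc hne
    have hc : c ≠ [] := hne c (by simp)
    have hcs : ∀ l ∈ cs, l ≠ [] := fun l hl => hne l (by simp [hl])
    calc (c :: cs).foldl pvStepA acc
        = cs.foldl pvStepA (pvStepA acc c) := rfl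
      _ = pvStepA acc c ++ pvGlue (pvStepA acc c) cs := ih _ hcs
      _ = acc ++ pvGlue acc (c :: cs) := by
          have hlast : pvIdLast (pvStepA acc c) = pvIdLast c := by
            rw [pvStepA_eq, ← List.append_assoc]; exact pvIdLast_append _ _ hc
          rw [pvGlue_congr hlast cs, pvStepA_eq]
          simp [pvGlue]

-- ---------- pvTrunc and pvClean characterisation of A's per-line cleaning ----------

theorem pvDashPrefix {c : Char} {r : List Char} :
    ['-', '-'] <+: c :: r ↔ (c = '-' ∧ r.head? = some '-') := by
  constructor
  · rintro ⟨t, ht⟩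
    have ht' : '-' :: '-' :: t = c :: r := by simpa using ht
    injection ht' with h1 h2
    exact ⟨h1.symm, by simp [← h2]⟩
  · rintro ⟨rfl, hr⟩
    cases r with
    | nil => simp at hr
    | cons d r' =>
      simp only [List.head?_cons, Option.some.injEq] at hr
      subst hr
      exact ⟨r', rfl⟩

theorem pvTrunc_eq_self {l : List Char} (h : ¬ ['-', '-'] <:+: l) : pvTrunc l = l := by
  induction l with
  | nil => rfl
  | cons c r ih =>
    rw [List.infix_cons_iff, not_or] at h
    rw [pvTrunc, if_neg (fun hd => h.1 (pvDashPrefix.mpr hd)), ih h.2]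

theorem pvTrunc_spec {l : List Char} (h : ['-', '-'] <:+: l) :
    ∃ k, pvTrunc l = l.take k ∧ ['-', '-'] <+: l.drop k ∧ ∀ i < k, ¬ ['-', '-'] <+: l.drop i := by
  induction l with
  | nil => simp at h
  | cons c r ih =>
    by_cases hd : c = '-' ∧ r.head? = some '-'
    · exact ⟨0, by rw [pvTrunc, if_pos hd]; rfl, by simpa using pvDashPrefix.mpr hd, by omega⟩
    · have hr : ['-', '-'] <:+: r := by
        rcases List.infix_cons_iff.mp h with hp | hi
        · exact absurd (pvDashPrefix.mp hp) hd
        · exact hi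
      obtain ⟨k, h1, h2, h3⟩ := ih hr
      refine ⟨k + 1, by rw [pvTrunc, if_neg hd, h1]; rfl, by simpa using h2, ?_⟩
      intro i hi
      cases i with
      | zero =>
        intro hp
        exact hd (pvDashPrefix.mp (by simpa using hp))
      | succ j => exact fun hp => h3 j (by omega) (by simpa using hp)

theorem pvCleanA_eq (l : List Char) : pvCleanA l = pvClean l := by
  simp only [pvCleanA, pvClean]
  by_cases hin : PySem.Chars.isIn ['-', '-'] l = true
  · have hinf := (PySem.Chars.isIn_iff_infix _ _).mp hin
    have hnn : 0 ≤ PySem.Chars.find l ['-', '-'] := (PySem.Chars.find_nonneg_iff _ _).mpr hinf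
    obtain ⟨hpre, hmin⟩ := PySem.Chars.find_spec (s := l) (sub := ['-', '-']) hnn
    obtain ⟨k, h1, h2, h3⟩ := pvTrunc_spec hinf
    have hk : k = (PySem.Chars.find l ['-', '-']).toNat := by
      rcases Nat.lt_trichotomy k (PySem.Chars.find l ['-', '-']).toNat with h | h | h
      · exact absurd h2 (hmin k h)
      · exact h
      · exact absurd hpre (h3 _ h)
    rw [if_pos hin, h1, hk]
    congr 1
    simp only [PySem.Chars.slice_eq_listSlice]
    rw [PySem.List.slice_to _ hnn]
  · rw [if_neg (by simpa using hin), pvTrunc_eq_self]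
    intro hinf
    exact hin ((PySem.Chars.isIn_iff_infix _ _).mpr hinf)

theorem pvCleanFold (xs : List (List Char)) :
    xs.foldl (fun lines line =>
        let line := pvCleanA line
        if line ≠ [] then lines ++ [line] else lines) []
      = (xs.map pvClean).filter (· ≠ []) := by
  have h := PySem.List.foldl_append_if (fun x => decide (pvCleanA x ≠ [])) pvCleanA xs []
  simp only [decide_eq_true_eq] at h
  rw [show (fun (lines : List (List Char)) line =>
        let line := pvCleanA line
        if line ≠ [] then lines ++ [line] else lines)
      = fun lines x => if pvCleanA x ≠ [] then lines ++ [pvCleanA x] else lines from rfl, h]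
  rw [List.filter_map, List.nil_append, funext pvCleanA_eq]; rfl

-- ---------- strip facts ----------

theorem pvHead_dropWhile {p : Char → Bool} {l : List Char} {c : Char}
    (h : (List.dropWhile p l).head? = some c) : p c = false := by
  induction l with
  | nil => simp at h
  | cons a t ih =>
    by_cases hp : p a = true
    · rw [List.dropWhile_cons_of_pos hp] at h; exact ih h
    · rw [List.dropWhile_cons_of_neg hp] at h; simp at h; subst h; simpa using hp

theorem pvHead_of_prefix {l m : List Char} {c : Char} (h : l <+: m) (h2 : l.head? = some c) :
    m.head? = some c := by
  obtain ⟨t, rfl⟩ := h; cases l <;> simp_all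

theorem pvStrip_head {s : List Char} {c : Char} (h : (PySem.Chars.strip s).head? = some c) :
    PySem.Chars.isspace c = false := by
  have hpre : PySem.Chars.strip s <+: PySem.Chars.lstrip s := by
    simp only [PySem.Chars.strip, PySem.Chars.rstrip]
    obtain ⟨pre, hpre⟩ := List.dropWhile_suffix (l := (PySem.Chars.lstrip s).reverse)
      (p := PySem.Chars.isspace)
    exact ⟨pre.reverse, by
      conv_rhs => rw [← (PySem.Chars.lstrip s).reverse_reverse, ← hpre]
      simp⟩
  exact pvHead_dropWhile (pvHead_of_prefix hpre h)

theorem pvStrip_last {s : List Char} {c : Char} (h : (PySem.Chars.strip s).getLast? = some c) :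
    PySem.Chars.isspace c = false := by
  simp only [PySem.Chars.strip, PySem.Chars.rstrip, List.getLast?_reverse] at h
  exact pvHead_dropWhile h

theorem pvRstrip_cons_not {c : Char} (t : List Char) (hc : PySem.Chars.isspace c = false) :
    PySem.Chars.rstrip (c :: t) = c :: PySem.Chars.rstrip t := by
  simp only [PySem.Chars.rstrip, List.reverse_cons, List.dropWhile_append]
  by_cases h : (List.dropWhile PySem.Chars.isspace t.reverse).isEmpty
  · rw [if_pos h, List.dropWhile_cons_of_neg (by simp [hc]), List.isEmpty_iff.mp h]
    simp
  · rw [if_neg h]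
    simp

theorem pvRstrip_cons_ws {c : Char} (t : List Char) (hc : PySem.Chars.isspace c = true) :
    PySem.Chars.rstrip (c :: t)
      = if PySem.Chars.rstrip t = [] then [] else c :: PySem.Chars.rstrip t := by
  simp only [PySem.Chars.rstrip, List.reverse_cons, List.dropWhile_append]
  by_cases h : (List.dropWhile PySem.Chars.isspace t.reverse).isEmpty
  · have h0 : List.dropWhile PySem.Chars.isspace t.reverse = [] := List.isEmpty_iff.mp h
    rw [if_pos h, List.dropWhile_cons_of_pos hc, List.dropWhile_nil, h0]
    simp
  · have h0 : List.dropWhile PySem.Chars.isspace t.reverse ≠ [] := by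
      simpa [List.isEmpty_iff] using h
    rw [if_neg h, if_neg (by simpa using h0)]
    simp

theorem pvStrip_cons_ws {c : Char} (t : List Char) (hc : PySem.Chars.isspace c = true) :
    PySem.Chars.strip (c :: t) = PySem.Chars.strip t := by
  simp only [PySem.Chars.strip, PySem.Chars.lstrip, List.dropWhile_cons_of_pos hc]

theorem pvStrip_cons_not {c : Char} (t : List Char) (hc : PySem.Chars.isspace c = false) :
    PySem.Chars.strip (c :: t) = c :: PySem.Chars.rstrip t := by
  simp only [PySem.Chars.strip, PySem.Chars.lstrip]
  rw [List.dropWhile_cons_of_neg (by simp [hc])]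
  exact pvRstrip_cons_not t hc

-- pvClean unfoldings
theorem pvClean_nil : pvClean [] = [] := rfl

theorem pvClean_dash {c : Char} {m : List Char} (h : c = '-' ∧ m.head? = some '-') :
    pvClean (c :: m) = [] := by
  simp only [pvClean, pvTrunc, if_pos h]
  rfl

theorem pvClean_ws {c : Char} {m : List Char} (hnd : ¬ (c = '-' ∧ m.head? = some '-'))
    (hw : PySem.Chars.isspace c = true) : pvClean (c :: m) = pvClean m := by
  simp only [pvClean, pvTrunc, if_neg hnd]
  exact pvStrip_cons_ws _ hw

theorem pvClean_content {c : Char} {m : List Char} (hnd : ¬ (c = '-' ∧ m.head? = some '-'))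
    (hw : PySem.Chars.isspace c = false) :
    pvClean (c :: m) = c :: PySem.Chars.rstrip (pvTrunc m) := by
  simp only [pvClean, pvTrunc, if_neg hnd]
  exact pvStrip_cons_not _ hw

-- cleaned lines: nonempty, and both ends non-whitespace
def pvGoodLine (l : List Char) : Prop :=
  l ≠ [] ∧ (∀ c, l.getLast? = some c → PySem.Chars.isspace c = false) ∧
    (∀ c, l.head? = some c → PySem.Chars.isspace c = false)

theorem pvClean_good {l m : List Char} (h : pvClean l = m) (hm : m ≠ []) : pvGoodLine m := by
  subst h
  exact ⟨hm, fun c hc => pvStrip_last hc, fun c hc => pvStrip_head hc⟩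

theorem pvLstrip_eq_self {z : List Char} {c : Char} (hz : z.head? = some c)
    (hc : PySem.Chars.isspace c = false) : PySem.Chars.lstrip z = z := by
  cases z with
  | nil => rfl
  | cons a t =>
    simp only [List.head?_cons, Option.some.injEq] at hz; subst hz
    exact List.dropWhile_cons_of_neg (by simp [hc])

theorem pvRstrip_eq_self {z : List Char} {c : Char} (hz : z.getLast? = some c)
    (hc : PySem.Chars.isspace c = false) : PySem.Chars.rstrip z = z := by
  have : z.reverse.head? = some c := by simpa using hz
  cases hrev : z.reverse with
  | nil => simp_all
  | cons a t =>
    rw [hrev] at this; simp only [List.head?_cons, Option.some.injEq] at this; subst this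
    have hnot : ¬ PySem.Chars.isspace a = true := by simp [hc]
    calc PySem.Chars.rstrip z = (List.dropWhile PySem.Chars.isspace (a :: t)).reverse := by
          rw [PySem.Chars.rstrip, hrev]
      _ = z := by rw [List.dropWhile_cons_of_neg hnot, ← hrev, List.reverse_reverse]

theorem pvGlue_last (rest : List (List Char)) :
    ∀ (prev acc : List Char), pvGoodLine acc → (∀ l ∈ rest, pvGoodLine l) →
      pvGoodLine (acc ++ pvGlue prev rest) := by
  induction rest with
  | nil => intro prev acc hacc _; simpa [pvGlue] using hacc
  | cons c cs ih =>
    intro prev acc hacc hrest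
    have hc : pvGoodLine c := hrest c (by simp)
    have hcs : ∀ l ∈ cs, pvGoodLine l := fun l hl => hrest l (by simp [hl])
    have : acc ++ pvGlue prev (c :: cs)
        = (acc ++ ((if pvIdLast prev && pvIdFirst c then [' '] else []) ++ c)) ++ pvGlue c cs := by
      simp [pvGlue]
    rw [this]
    refine ih c _ ⟨by simp [hc.1], ?_, ?_⟩ hcs
    · intro d hd
      rw [← List.append_assoc, List.getLast?_append_of_ne_nil _ hc.1] at hd
      exact hc.2.1 d hd
    · intro d hd
      cases acc with
      | nil => exact absurd rfl hacc.1
      | cons a t => simp only [List.cons_append, List.head?_cons, Option.some.injEq] at hd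
                    exact hacc.2.2 d (by simp [← hd])

theorem pvStrip_final {l0 : List Char} {rest : List (List Char)}
    (h0 : pvGoodLine l0) (hr : ∀ l ∈ rest, pvGoodLine l) :
    PySem.Chars.strip (' ' :: (l0 ++ pvGlue l0 rest)) = l0 ++ pvGlue l0 rest := by
  have hz := pvGlue_last rest l0 l0 h0 hr
  obtain ⟨hne, hlast, hhead⟩ := hz
  obtain ⟨c, hc⟩ : ∃ c, (l0 ++ pvGlue l0 rest).head? = some c := by
    cases hzz : l0 ++ pvGlue l0 rest with
    | nil => exact absurd hzz hne
    | cons a t => exact ⟨a, by simp⟩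
  obtain ⟨d, hd⟩ : ∃ d, (l0 ++ pvGlue l0 rest).getLast? = some d := by
    cases hzz : (l0 ++ pvGlue l0 rest).getLast? with
    | none => rw [List.getLast?_eq_none_iff] at hzz; exact absurd hzz hne
    | some d => exact ⟨d, rfl⟩
  have h1 : PySem.Chars.lstrip (' ' :: (l0 ++ pvGlue l0 rest)) = l0 ++ pvGlue l0 rest := by
    simp only [PySem.Chars.lstrip, List.dropWhile_cons_of_pos (by decide :
      PySem.Chars.isspace ' ' = true)]
    exact pvLstrip_eq_self hc (hhead c hc)
  simp only [PySem.Chars.strip, h1]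
  exact pvRstrip_eq_self hd (hlast d hd)

-- ---------- splitOn = pvSplit ----------

theorem pvSplit_ne_nil (l cur : List Char) : pvSplit cur l ≠ [] := by
  induction l generalizing cur with
  | nil => simp [pvSplit]
  | cons c rest ih =>
    by_cases h : c = '\n' <;> simp [pvSplit, h, ih]

theorem pvSplit_no_nl (l : List Char) :
    ∀ cur, '\n' ∉ cur → ∀ p ∈ pvSplit cur l, '\n' ∉ p := by
  induction l with
  | nil => intro cur hcur p hp; simp [pvSplit] at hp; subst hp; exact hcur
  | cons c rest ih =>
    intro cur hcur p hp
    by_cases h : c = '\n'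
    · rw [pvSplit, if_pos h] at hp
      rcases List.mem_cons.mp hp with rfl | hp
      · exact hcur
      · exact ih [] (by simp) p hp
    · rw [pvSplit, if_neg h] at hp
      refine ih (cur ++ [c]) ?_ p hp
      intro hx
      rcases List.mem_append.mp hx with hx | hx
      · exact hcur hx
      · simp at hx; exact h hx.symm

theorem pvSplit_join (l : List Char) :
    ∀ cur, PySem.Chars.join ['\n'] (pvSplit cur l) = cur ++ l := by
  induction l with
  | nil => intro cur; simp [pvSplit, PySem.Chars.join_singleton]
  | cons c rest ih =>
    intro cur
    by_cases h : c = '\n'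
    · subst h
      rw [pvSplit, if_pos rfl]
      obtain ⟨y, zs, hyz⟩ : ∃ y zs, pvSplit ([] : List Char) rest = y :: zs := by
        cases hh : pvSplit ([] : List Char) rest with
        | nil => exact absurd hh (pvSplit_ne_nil rest [])
        | cons y zs => exact ⟨y, zs, rfl⟩
      rw [hyz, PySem.Chars.join_cons_cons, ← hyz, ih []]
      simp
    · rw [pvSplit, if_neg h, ih (cur ++ [c])]
      simp

theorem pvGo_eq (fuel : Nat) :
    ∀ (l cur : List Char) (acc : List (List Char)), l.length < fuel →
      PySem.Chars.splitOn.go ['\n'] fuel l cur acc = acc.reverse ++ pvSplit cur.reverse l := by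
  induction fuel with
  | zero => intro l cur acc h; omega
  | succ fuel ih =>
    intro l cur acc h
    cases l with
    | nil =>
      have hstep : PySem.Chars.splitOn.go ['\n'] (fuel + 1) [] cur acc
          = (cur.reverse :: acc).reverse := rfl
      rw [hstep]
      simp [pvSplit]
    | cons c rest =>
      have hstep : PySem.Chars.splitOn.go ['\n'] (fuel + 1) (c :: rest) cur acc
          = if List.isPrefixOf ['\n'] (c :: rest) = true then
              PySem.Chars.splitOn.go ['\n'] fuel (List.drop (List.length ['\n']) (c :: rest)) []
                (cur.reverse :: acc)
            else PySem.Chars.splitOn.go ['\n'] fuel rest (c :: cur) acc := rfl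
      by_cases hc : c = '\n'
      · subst hc
        have hpre : List.isPrefixOf ['\n'] ('\n' :: rest) = true := by
          simp [List.isPrefixOf]
        rw [hstep, if_pos hpre, show List.drop (List.length ['\n']) ('\n' :: rest) = rest from rfl,
          ih rest [] (cur.reverse :: acc) (by simp at h ⊢; omega)]
        simp [pvSplit]
      · have hpre : ¬ List.isPrefixOf ['\n'] (c :: rest) = true := by
          simp [List.isPrefixOf]
          exact fun hh => absurd hh.symm hc
        rw [hstep, if_neg hpre, ih rest (c :: cur) acc (by simp at h ⊢; omega)]
        simp [pvSplit, hc]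

theorem pvSplitOn_eq (l : List Char) :
    PySem.Chars.splitOn l ['\n'] = pvSplit [] l := by
  simp only [PySem.Chars.splitOn]
  rw [pvGo_eq (l.length + 1) l [] [] (by omega)]
  simp

-- ---------- B's scan on newline-free segments ----------

theorem pvScan_comment (l : List Char) (hnl : '\n' ∉ l) :
    ∀ out hold broke, pvScan out hold true broke l = out := by
  induction l with
  | nil => intro out hold broke; rw [pvScan]
  | cons c rest ih =>
    intro out hold broke
    have hc : ¬ c = '\n' := fun h => hnl (by simp [h])
    rw [pvScan, if_neg hc, if_pos rfl]
    exact ih (fun h => hnl (by simp [h])) out hold broke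

theorem pvScan_split (n : Nat) :
    ∀ l : List Char, l.length ≤ n → '\n' ∉ l → ∀ out hold inC broke rest,
      pvScan out hold inC broke (l ++ '\n' :: rest)
        = pvScan (pvScan out hold inC broke l) [] false true rest := by
  induction n with
  | zero =>
    intro l hl _ out hold inC broke rest
    have hnil : l = [] := by cases l <;> simp_all
    subst hnil
    rw [List.nil_append, pvScan]
    rw [pvScan, if_pos rfl]
  | succ n ih =>
    intro l hl hnl out hold inC broke rest
    cases l with
    | nil =>
      rw [List.nil_append, pvScan]
      rw [pvScan, if_pos rfl]
    | cons c m =>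
      have hc : ¬ c = '\n' := fun h => hnl (by simp [h])
      have hm : '\n' ∉ m := fun h => hnl (by simp [h])
      have hlen : m.length ≤ n := by simp at hl; omega
      rw [List.cons_append, pvScan, if_neg hc]
      cases inC with
      | true =>
        rw [if_pos rfl]
        conv_rhs => rw [pvScan, if_neg hc, if_pos rfl]
        exact ih m hlen hm out hold true broke rest
      | false =>
        rw [if_neg (show ¬ (false = true) by simp)]
        have hhead : (m ++ '\n' :: rest).head? = some '-' ↔ m.head? = some '-' := by
          cases m <;> simp
        by_cases h2 : c = '-' ∧ m.head? = some '-'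
        · obtain ⟨m0, m', rfl⟩ : ∃ m0 m', m = m0 :: m' := by
            cases m with
            | nil => exact absurd h2.2 (by simp)
            | cons m0 m' => exact ⟨m0, m', rfl⟩
          rw [if_pos (show c = '-' ∧ ((m0 :: m') ++ '\n' :: rest).head? = some '-' from
            ⟨h2.1, by simpa using h2.2⟩),
            show ((m0 :: m') ++ '\n' :: rest).tail = m' ++ '\n' :: rest from rfl]
          conv_rhs => rw [pvScan, if_neg hc, if_neg (show ¬ (false = true) by simp), if_pos h2]
          rw [show (m0 :: m').tail = m' from rfl]
          exact ih m' (by simp at hlen ⊢; omega) (fun h => hm (by simp [h])) out hold true broke rest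
        · rw [if_neg (fun hx => h2 ⟨hx.1, hhead.mp hx.2⟩)]
          by_cases h3 : PySem.Chars.isspace c = true
          · rw [if_pos h3]
            conv_rhs => rw [pvScan, if_neg hc, if_neg (show ¬ (false = true) by simp),
              if_neg h2, if_pos h3]
            exact ih m hlen hm out _ false broke rest
          · rw [if_neg h3]
            conv_rhs => rw [pvScan, if_neg hc, if_neg (show ¬ (false = true) by simp),
              if_neg h2, if_neg h3]
            exact ih m hlen hm _ [] false false rest

theorem pvScan_body (m : List Char) (hm : '\n' ∉ m) :
    ∀ out hold, out ≠ [] → pvScan out hold false false m = out ++ pvBody hold m := by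
  induction m with
  | nil => intro out hold _; rw [pvScan]; simp [pvBody]
  | cons c rest ih =>
    intro out hold hne
    have hc : ¬ c = '\n' := fun h => hm (by simp [h])
    have hrest : '\n' ∉ rest := fun h => hm (by simp [h])
    rw [pvScan, if_neg hc, if_neg (show ¬ (false = true) by simp), pvBody]
    by_cases h2 : c = '-' ∧ rest.head? = some '-'
    · rw [if_pos h2, if_pos h2,
        pvScan_comment rest.tail (fun h => hrest (List.mem_of_mem_tail h))]
      simp
    · rw [if_neg h2, if_neg h2]
      by_cases h3 : PySem.Chars.isspace c = true
      · rw [if_pos h3, if_pos h3, if_pos ⟨hne, rfl⟩]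
        exact ih hrest out (hold ++ [c]) hne
      · rw [if_neg h3, if_neg h3, if_neg (show ¬ (false = true) by simp)]
        rw [ih hrest (out ++ hold ++ [c]) [] (by simp)]
        simp

theorem pvRstrip_nil : PySem.Chars.rstrip ([] : List Char) = [] := rfl

theorem pvBody_eq (m : List Char) :
    ∀ hold, pvBody hold m =
      if PySem.Chars.rstrip (pvTrunc m) = [] then []
      else hold ++ PySem.Chars.rstrip (pvTrunc m) := by
  induction m with
  | nil => intro hold; simp [pvBody, pvTrunc, pvRstrip_nil]
  | cons c rest ih =>
    intro hold
    rw [pvBody, pvTrunc]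
    by_cases h2 : c = '-' ∧ rest.head? = some '-'
    · rw [if_pos h2, if_pos h2]
      simp [pvRstrip_nil]
    · rw [if_neg h2, if_neg h2]
      by_cases h3 : PySem.Chars.isspace c = true
      · rw [if_pos h3, ih (hold ++ [c]), pvRstrip_cons_ws _ h3]
        by_cases h4 : PySem.Chars.rstrip (pvTrunc rest) = []
        · simp [h4]
        · simp [h4]
      · rw [if_neg h3, pvRstrip_cons_not _ (by simpa using h3)]
        have hb : pvBody [] rest = PySem.Chars.rstrip (pvTrunc rest) := by
          rw [ih []]
          by_cases h4 : PySem.Chars.rstrip (pvTrunc rest) = [] <;> simp [h4]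
        rw [hb]
        simp

theorem pvLine_eq (l : List Char) :
    '\n' ∉ l → ∀ out broke, (broke = false → out = []) →
      pvScan out [] false broke l =
        if pvClean l = [] then out
        else out ++ (if broke && pvIdLast out && pvIdFirst (pvClean l) then [' '] else [])
          ++ pvClean l := by
  induction l with
  | nil => intro _ out broke _; rw [pvScan]; simp [pvClean_nil]
  | cons c m ih =>
    intro hnl out broke hob
    have hc : ¬ c = '\n' := fun h => hnl (by simp [h])
    have hm : '\n' ∉ m := fun h => hnl (by simp [h])
    rw [pvScan, if_neg hc, if_neg (show ¬ (false = true) by simp)]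
    by_cases h2 : c = '-' ∧ m.head? = some '-'
    · rw [if_pos h2, pvScan_comment m.tail (fun h => hm (List.mem_of_mem_tail h)),
        pvClean_dash h2, if_pos rfl]
    · rw [if_neg h2]
      by_cases h3 : PySem.Chars.isspace c = true
      · rw [if_pos h3]
        have hcond : ¬ (out ≠ [] ∧ broke = false) := by
          rintro ⟨hne, rfl⟩; exact hne (hob rfl)
        rw [if_neg hcond, pvClean_ws h2 h3]
        exact ih hm out broke hob
      · rw [if_neg h3]
        have h3' : PySem.Chars.isspace c = false := by simpa using h3
        have hclean := pvClean_content h2 h3'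
        rw [show ∀ X : List Char, pvScan (X ++ [c]) [] false false m
            = (X ++ [c]) ++ pvBody [] m from fun X => pvScan_body m hm (X ++ [c]) [] (by simp)]
        have hb : pvBody [] m = PySem.Chars.rstrip (pvTrunc m) := by
          rw [pvBody_eq m []]
          by_cases h4 : PySem.Chars.rstrip (pvTrunc m) = [] <;> simp [h4]
        rw [hb, hclean,
          if_neg (show ¬ (c :: PySem.Chars.rstrip (pvTrunc m) = []) by simp)]
        have hco : PySem.Set.contains pvIdentSet = pvIdent.contains := by
          rw [pvIdentSet_eq]; rfl
        have hfirst : pvIdFirst (c :: PySem.Chars.rstrip (pvTrunc m)) = pvIdent.contains c :=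
          pvIdFirst_cons _ _
        cases broke with
        | false =>
          have hout : out = [] := hob rfl
          subst hout
          simp
        | true =>
          rw [hfirst, if_pos (show (true : Bool) = true from rfl)]
          by_cases h5 : out = []
          · subst h5
            rw [if_neg (by rintro ⟨h, _⟩; exact h rfl)]
            simp [pvIdLast_nil]
          · by_cases h6 : pvIdLast out = true
            · by_cases h7 : pvIdent.contains c = true
              · have h7m : c ∈ pvIdent := by simpa using h7
                rw [if_pos ⟨h5, by rw [hco]; exact h6, by rw [hco]; exact h7⟩]
                simp [h6, h7m]
              · have h7m : c ∉ pvIdent := by simpa using h7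
                rw [if_neg (by rintro ⟨_, _, hx⟩; rw [hco] at hx; exact h7 hx)]
                simp [h6, h7m]
            · have h6' : pvIdLast out = false := by simpa using h6
              rw [if_neg (by rintro ⟨_, hx, _⟩; rw [hco] at hx; exact h6 hx)]
              simp [h6']

-- the main induction over lines
theorem pvScan_lines (ls : List (List Char)) :
    (∀ l ∈ ls, '\n' ∉ l) → ∀ out broke, (broke = false → out = []) →
      ∀ prev, pvIdLast prev = (broke && pvIdLast out) →
      pvScan out [] false broke (PySem.Chars.join ['\n'] ls)
        = out ++ pvGlue prev ((ls.map pvClean).filter (· ≠ [])) := by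
  induction ls with
  | nil =>
    intro _ out broke _ prev _
    rw [show PySem.Chars.join ['\n'] [] = [] from rfl, pvScan]
    simp [pvGlue]
  | cons l rest ih =>
    intro hnl out broke hob prev hprev
    have hl : '\n' ∉ l := hnl l (by simp)
    have hrest : ∀ p ∈ rest, '\n' ∉ p := fun p hp => hnl p (by simp [hp])
    cases rest with
    | nil =>
      rw [PySem.Chars.join_singleton, pvLine_eq l hl out broke hob]
      by_cases h : pvClean l = []
      · rw [if_pos h]
        simp [h, pvGlue]
      · rw [if_neg h]
        simp only [List.map_cons, List.map_nil, List.filter,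
          show (decide (pvClean l ≠ [])) = true by simpa using h]
        simp [pvGlue, hprev, Bool.and_assoc]
    | cons l2 rest2 =>
      rw [PySem.Chars.join_cons_cons, show l ++ ['\n'] ++ PySem.Chars.join ['\n'] (l2 :: rest2)
          = l ++ '\n' :: PySem.Chars.join ['\n'] (l2 :: rest2) by simp,
        pvScan_split l.length l le_rfl hl, pvLine_eq l hl out broke hob]
      by_cases h : pvClean l = []
      · rw [if_pos h]
        rw [ih hrest out true (by simp) out (by simp)]
        have hout : pvIdLast out = pvIdLast prev := by
          cases broke with
          | true => simpa using hprev.symm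
          | false =>
            have h0 : out = [] := hob rfl
            simp only [Bool.false_and] at hprev
            rw [h0, pvIdLast_nil, hprev]
        rw [pvGlue_congr hout]
        simp [h]
      · rw [if_neg h]
        have haux : ∀ a : List Char, pvIdLast (pvClean l) = (true && pvIdLast (a ++ pvClean l)) :=
          fun a => by rw [pvIdLast_append _ _ h]; simp
        rw [ih hrest _ true (by simp) (pvClean l) (haux _)]
        simp only [List.map_cons, List.filter,
          show (decide (pvClean l ≠ [])) = true by simpa using h]
        simp [pvGlue, hprev, Bool.and_assoc]

-- A's whole pipeline
theorem pvA_eq (code : String) :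
    minify_py code
      = String.ofList (pvGlueAll (((pvSplit [] code.toList).map pvClean).filter (· ≠ []))) := by
  unfold minify_py
  rw [pvCleanFold, pvSplitOn_eq]
  cases hls : ((pvSplit [] code.toList).map pvClean).filter (· ≠ []) with
  | nil => decide
  | cons l0 rest =>
    have hmem : ∀ l ∈ l0 :: rest, pvGoodLine l := by
      intro l hl
      have := List.of_mem_filter (by rw [hls]; exact hl)
      have hne : l ≠ [] := by simpa using this
      have hmap : l ∈ (pvSplit [] code.toList).map pvClean :=
        List.mem_of_mem_filter (by rw [hls]; exact hl)
      obtain ⟨x, _, hx⟩ := List.mem_map.mp hmap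
      exact pvClean_good hx hne
    have h0 : pvGoodLine l0 := hmem l0 (by simp)
    have hr : ∀ l ∈ rest, pvGoodLine l := fun l hl => hmem l (by simp [hl])
    have hA : (l0 :: rest).foldl pvStepA [' '] = [' '] ++ pvGlue [' '] (l0 :: rest) :=
      pvFoldA_eq _ [' '] (fun l hl => (hmem l hl).1)
    have hsp : pvIdLast [' '] = false := by decide
    have hglue : pvGlue [' '] (l0 :: rest) = l0 ++ pvGlue l0 rest := by
      simp [pvGlue, hsp]
    show String.ofList (PySem.Chars.strip ((l0 :: rest).foldl pvStepA [' ']))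
        = String.ofList (pvGlueAll (l0 :: rest))
    rw [hA, hglue]
    exact congrArg String.ofList (pvStrip_final h0 hr)

-- B's whole pipeline
theorem pvB_eq (code : String) :
    minify_py_alt code
      = String.ofList (pvGlueAll (((pvSplit [] code.toList).map pvClean).filter (· ≠ []))) := by
  unfold minify_py_alt
  have hnl := pvSplit_no_nl code.toList [] (by simp)
  have hj : PySem.Chars.join ['\n'] (pvSplit [] code.toList) = code.toList := by
    rw [pvSplit_join]; simp
  have hmain : pvScan [] [] false false code.toList
      = [] ++ pvGlue [] (((pvSplit [] code.toList).map pvClean).filter (· ≠ [])) := by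
    conv_lhs => rw [← hj]
    exact pvScan_lines (pvSplit [] code.toList) hnl [] false (fun _ => rfl) []
      (by simp [pvIdLast_nil])
  rw [hmain]
  cases ((pvSplit [] code.toList).map pvClean).filter (· ≠ []) with
  | nil => rfl
  | cons l0 rest => simp [pvGlue, pvGlueAll, pvIdLast_nil]

-- ===== VERDICT (by name: the statement is the Claim_ definition above) =====
theorem minify_py_spec : Claim_equal_minify_py := by
  intro code _
  unfold Spec_minify_py
  rw [pvA_eq, pvB_eq]
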